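-- pv_equiv track=rewrite | github.com/ReismanLab/regio_dataset_design | utils/preprocessing.py | drop_symmetric_carbons
-- ===== SOURCE A (Python) =====
-- def drop_symmetric_carbons(sym_group):
--     """
--     Input:    sym_group, dict()
--         keys: atom idx
--         values: idx of the group they belong to
--     Output:  unique_dict, dict()
--         keys: atom idx of reduced number of atoms
--         values: number of atoms per group
--     """
--     unique_dict = {}
--     seen_values = set()
--
--     for key, value in sym_group.items():
--         if value not in seen_values:
--             unique_dict[key] = list(sym_group.values()).count(value)
--             seen_values.add(value)
--
--     return unique_dict
-- ===== SOURCE B (Python) =====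
-- def drop_symmetric_carbons(sym_group):
--     groups = {}
--     for key, value in sym_group.items():
--         groups.setdefault(value, []).append(key)
--     return {keys[0]: len(keys) for keys in groups.values()}
-- ===== Notes on version B (the rewrite author's own statement) =====
-- stated objective: simpler
-- what changed: B builds a value->keys grouping dict in one pass and emits {first key: group size}, dropping A's seen-values set and the per-group rescan of the whole values list via .count.
import Mathlib
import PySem

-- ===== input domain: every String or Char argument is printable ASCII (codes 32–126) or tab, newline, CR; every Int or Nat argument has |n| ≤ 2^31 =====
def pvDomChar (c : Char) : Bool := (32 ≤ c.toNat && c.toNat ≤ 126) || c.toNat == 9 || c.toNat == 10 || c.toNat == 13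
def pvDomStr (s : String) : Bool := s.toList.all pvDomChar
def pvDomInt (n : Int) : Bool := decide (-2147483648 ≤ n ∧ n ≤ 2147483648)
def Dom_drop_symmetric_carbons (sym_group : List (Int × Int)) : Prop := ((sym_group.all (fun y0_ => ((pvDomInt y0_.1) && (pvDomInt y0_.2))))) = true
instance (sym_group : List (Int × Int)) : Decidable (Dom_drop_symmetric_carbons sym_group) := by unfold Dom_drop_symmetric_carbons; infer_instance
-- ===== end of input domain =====

-- B replaces A's seen-values set plus a full .count rescan per group by one grouping
-- dict value -> keys, emitting {first key: group size}; equivalence of return values is proved.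

-- ===== PORT A =====
def drop_symmetric_carbons (sym_group : List (Int × Int)) : List (Int × Int) :=
  (sym_group.foldl
    (fun (st : PySem.Dict Int Int × PySem.Set Int) kv =>
      if PySem.Set.contains st.2 kv.2 then st
      else (st.1.insert kv.1 ((PySem.List.count (sym_group.map Prod.snd) kv.2 : Int)),
            PySem.Set.add st.2 kv.2))
    (PySem.Dict.empty, PySem.Set.empty)).1.items

-- ===== PORT B =====
def drop_symmetric_carbons_alt (sym_group : List (Int × Int)) : List (Int × Int) :=
  -- groups.setdefault(value, []).append(key) = Dict.modify value [] (· ++ [key])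
  let groups : PySem.Dict Int (List Int) :=
    sym_group.foldl (fun d kv => d.modify kv.2 [] (· ++ [kv.1])) PySem.Dict.empty
  -- keys[0] ported as headI: every group list is nonempty by construction, so exact
  ((PySem.Dict.values groups).foldl
    (fun (d : PySem.Dict Int Int) ks => d.insert ks.headI ((ks.length : Int)))
    PySem.Dict.empty).items

-- ===== PRECONDITION & SPEC =====
def Spec_drop_symmetric_carbons (sym_group : List (Int × Int)) (out : List (Int × Int)) : Prop := out = drop_symmetric_carbons_alt sym_group
instance (sym_group : List (Int × Int)) (out : List (Int × Int)) : Decidable (Spec_drop_symmetric_carbons sym_group out) := by unfold Spec_drop_symmetric_carbons; infer_instance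

-- ===== CLAIM (what is proved, stated in full; the proofs are below) =====
def Claim_equal_drop_symmetric_carbons : Prop := ∀ (sym_group : List (Int × Int)), Dom_drop_symmetric_carbons sym_group → Spec_drop_symmetric_carbons sym_group (drop_symmetric_carbons sym_group)

-- ===== LEMMAS AND PROOFS =====

/-- The first-occurrence pairs of `l` whose value is not yet in `seen`. -/
def pvSieve : List (Int × Int) → PySem.Set Int → List (Int × Int)
  | [], _ => []
  | kv :: t, seen =>
      if PySem.Set.contains seen kv.2 then pvSieve t seen
      else kv :: pvSieve t (PySem.Set.add seen kv.2)

theorem pvSieve_pos (kv : Int × Int) (t : List (Int × Int)) (seen : PySem.Set Int)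
    (h : kv.2 ∈ seen) : pvSieve (kv :: t) seen = pvSieve t seen := by
  simp [pvSieve]
  exact fun h' => absurd h h' 

theorem pvSieve_neg (kv : Int × Int) (t : List (Int × Int)) (seen : PySem.Set Int)
    (h : kv.2 ∉ seen) : pvSieve (kv :: t) seen = kv :: pvSieve t (PySem.Set.add seen kv.2) := by
  simp [pvSieve]
  exact fun h' => absurd h' h

theorem pvAdd_pos (seen : PySem.Set Int) (v : Int) (h : v ∈ seen) :
    PySem.Set.add seen v = seen := by
  simp [PySem.Set.add]
  exact h

theorem pvAdd_neg (seen : PySem.Set Int) (v : Int) (h : v ∉ seen) :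
    PySem.Set.add seen v = seen ++ [v] := by
  simp [PySem.Set.add]
  exact fun h' => absurd h' h

theorem pvA_loop (c : Int → Int) (l : List (Int × Int)) (d : PySem.Dict Int Int)
    (seen : PySem.Set Int) :
    (l.foldl
      (fun (st : PySem.Dict Int Int × PySem.Set Int) kv =>
        if PySem.Set.contains st.2 kv.2 then st
        else (st.1.insert kv.1 (c kv.2), PySem.Set.add st.2 kv.2))
      (d, seen)).1
    = (pvSieve l seen).foldl (fun d p => d.insert p.1 (c p.2)) d := by
  induction l generalizing d seen with
  | nil => rfl
  | cons kv t ih =>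
      by_cases h : kv.2 ∈ seen
      · rw [List.foldl_cons, pvSieve_pos kv t seen h]
        have hc := (PySem.Set.contains_iff seen kv.2).2 h
        simp only [hc, if_pos]
        exact ih d seen
      · rw [List.foldl_cons, pvSieve_neg kv t seen h]
        have hc : PySem.Set.contains seen kv.2 = false := by
          rw [← Bool.not_eq_true]; exact fun hc => h ((PySem.Set.contains_iff seen kv.2).1 hc)
        simp only [hc, Bool.false_eq_true, if_false, List.foldl_cons]
        exact ih _ _

theorem pvSieve_update (l : List (Int × Int)) (seen : PySem.Set Int) :
    PySem.Set.update seen (l.map Prod.snd) = seen ++ (pvSieve l seen).map Prod.snd := by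
  induction l generalizing seen with
  | nil => simp [PySem.Set.update, pvSieve]
  | cons kv t ih =>
      by_cases h : kv.2 ∈ seen
      · rw [pvSieve_pos kv t seen h]
        have : PySem.Set.update seen (List.map Prod.snd (kv :: t))
            = PySem.Set.update seen (List.map Prod.snd t) := by
          simp [PySem.Set.update, pvAdd_pos seen kv.2 h]
        rw [this, ih seen]
      · rw [pvSieve_neg kv t seen h]
        have h1 : PySem.Set.update seen (List.map Prod.snd (kv :: t))
            = PySem.Set.update (PySem.Set.add seen kv.2) (List.map Prod.snd t) := by
          simp [PySem.Set.update]
        rw [h1, ih (PySem.Set.add seen kv.2), pvAdd_neg seen kv.2 h]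
        simp

theorem pvSieve_not_seen (l : List (Int × Int)) (seen : PySem.Set Int) (k v : Int)
    (h : (k, v) ∈ pvSieve l seen) : v ∉ seen := by
  induction l generalizing seen with
  | nil => simp [pvSieve] at h
  | cons kv t ih =>
      by_cases hc : kv.2 ∈ seen
      · rw [pvSieve_pos kv t seen hc] at h
        exact ih seen h
      · rw [pvSieve_neg kv t seen hc] at h
        rcases List.mem_cons.1 h with h | h
        · rw [show v = kv.2 from congrArg Prod.snd h]; exact hc
        · have := ih (PySem.Set.add seen kv.2) h
          rw [pvAdd_neg seen kv.2 hc] at this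
          simp at this
          exact this.1

theorem pvSieve_firstKey (l : List (Int × Int)) (seen : PySem.Set Int) (k v : Int)
    (h : (k, v) ∈ pvSieve l seen) :
    ((l.filter (fun p => p.2 == v)).map Prod.fst).headI = k := by
  induction l generalizing seen with
  | nil => simp [pvSieve] at h
  | cons kv t ih =>
      by_cases hc : kv.2 ∈ seen
      · rw [pvSieve_pos kv t seen hc] at h
        have hne : (kv.2 == v) = false := by
          have hv := pvSieve_not_seen t seen k v h
          simp only [beq_eq_false_iff_ne, ne_eq]
          intro he; rw [he] at hc; exact hv hc
        simp [List.filter_cons, hne, ih seen h]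
      · rw [pvSieve_neg kv t seen hc] at h
        rcases List.mem_cons.1 h with h | h
        · obtain ⟨h1, h2⟩ : kv.1 = k ∧ kv.2 = v :=
            ⟨(congrArg Prod.fst h).symm, (congrArg Prod.snd h).symm⟩
          simp [List.filter_cons, h2, h1]
        · have hns := pvSieve_not_seen t (PySem.Set.add seen kv.2) k v h
          rw [pvAdd_neg seen kv.2 hc] at hns
          simp at hns
          have hne : (kv.2 == v) = false := by
            simp only [beq_eq_false_iff_ne, ne_eq]
            intro he; exact hns.2 he.symm
          simp [List.filter_cons, hne, ih _ h]

theorem pvCount_filter (l : List (Int × Int)) (v : Int) :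
    ((PySem.List.count (l.map Prod.snd) v : Int)) =
      ((l.filter (fun p => p.2 == v)).length : Int) := by
  induction l with
  | nil => simp [PySem.List.count]
  | cons kv t ih =>
      by_cases h : kv.2 = v <;>
        simp [PySem.List.count, List.count_cons, List.filter_cons, h] at * <;> omega

theorem pvGroups_items (l : List (Int × Int)) :
    (l.foldl (fun (d : PySem.Dict Int (List Int)) kv => d.modify kv.2 [] (· ++ [kv.1]))
        PySem.Dict.empty).items
    = (PySem.Set.ofList (l.map Prod.snd)).map
        (fun v => (v, (l.filter (fun p => p.2 == v)).map Prod.fst)) := by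
  set g := l.foldl (fun (d : PySem.Dict Int (List Int)) kv => d.modify kv.2 [] (· ++ [kv.1]))
      PySem.Dict.empty with hg
  have hkeys : g.keys = PySem.Set.ofList (l.map Prod.snd) := by
    rw [hg, PySem.Dict.keys_foldl_modify_key]
    simp [PySem.Set.update, PySem.Set.ofList_eq_foldl, PySem.Dict.keys_empty]
  have hnodup : g.keys.Nodup := by
    rw [hg]
    exact PySem.Dict.nodup_keys_foldl_modify_key l Prod.snd [] (fun _ kv => (· ++ [kv.1])) _
      (by simp [PySem.Dict.keys_empty])
  have hget : ∀ v : Int, g.getD v [] = (l.filter (fun p => p.2 == v)).map Prod.fst := by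
    intro v
    have hswap : g = (l.map (fun p => (p.2, p.1))).foldl
        (fun (d : PySem.Dict Int (List Int)) p => d.modify p.1 [] (· ++ [p.2]))
        PySem.Dict.empty := by
      rw [hg, List.foldl_map]
    rw [hswap, PySem.Dict.getD_foldl_modify_append]
    simp [List.filter_map, Function.comp_def, List.map_map]
  rw [PySem.Dict.items_eq_map_keys g hnodup []]
  rw [hkeys]
  exact List.map_congr_left (fun v _ => by rw [hget v])

theorem drop_symmetric_carbons_eq (l : List (Int × Int)) :
    drop_symmetric_carbons l = drop_symmetric_carbons_alt l := by
  unfold drop_symmetric_carbons drop_symmetric_carbons_alt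
  rw [pvA_loop (fun v => ((PySem.List.count (List.map Prod.snd l) v : Int))) l
      PySem.Dict.empty PySem.Set.empty]
  have hofList : PySem.Set.ofList (l.map Prod.snd) = (pvSieve l PySem.Set.empty).map Prod.snd := by
    have := pvSieve_update l PySem.Set.empty
    simpa [PySem.Set.update, PySem.Set.ofList_eq_foldl, PySem.Set.empty] using this
  simp only [PySem.Dict.values, pvGroups_items, hofList]
  rw [List.map_map, List.foldl_map, List.foldl_map]
  congr 1
  apply PySem.List.foldl_congr_mem
  intro d p hp
  obtain ⟨k, v⟩ := p
  have hk := pvSieve_firstKey l PySem.Set.empty k v hp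
  have hc := pvCount_filter l v
  simp only [Function.comp]
  rw [hk, hc]
  simp

-- ===== VERDICT (by name: the statement is the Claim_ definition above) =====
theorem drop_symmetric_carbons_spec : Claim_equal_drop_symmetric_carbons := by
  intro l _
  unfold Spec_drop_symmetric_carbons
  exact drop_symmetric_carbons_eq l
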